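-- pv_equiv track=rewrite | github.com/always-awake/algorithm_practice | Brute_force_Search/1.py | solution
-- ===== SOURCE A (Python) =====
-- def solution(answers):
--     first = [1,2,3,4,5]
--     second = [2,1,2,3,2,4,2,5]
--     third = [3,3,1,1,2,2,4,4,5,5]
--     scores = [0, 0, 0]
--
--     for index, answer in enumerate(answers):
--         if first[index%len(first)] == answer:
--             scores[0] += 1
--         if second[index%len(second)] == answer:
--             scores[1] += 1
--         if third[index%len(third)] == answer:
--             scores[2] += 1
--     answer = []
--     for index, score in enumerate(scores):
--         if score == max(scores):
--             answer.append(index+1)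
--     return answer
-- ===== SOURCE B (Python) =====
-- def solution(answers):
--     # Position-residue histogram: the three patterns repeat with period lcm(5,8,10)=40,
--     # so one pass buckets answers by (index % 40, value); each pattern's score is then
--     # aggregated from the 40 buckets without re-scanning the answers.
--     counts = {}
--     for i, a in enumerate(answers):
--         key = (i % 40, a)
--         counts[key] = counts.get(key, 0) + 1
--     patterns = [[1, 2, 3, 4, 5], [2, 1, 2, 3, 2, 4, 2, 5], [3, 3, 1, 1, 2, 2, 4, 4, 5, 5]]
--     scores = [sum(counts.get((j, p[j % len(p)]), 0) for j in range(40))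
--               for p in patterns]
--     m = max(scores)
--     return [i + 1 for i, s in enumerate(scores) if s == m]
-- ===== Notes on version B (the rewrite author's own statement) =====
-- stated objective: alternative
-- what changed: A compares every answer against all three cyclic patterns in one interleaved scan; B instead builds a (index mod 40, value) histogram in a single pass over the answers (40 = lcm of the pattern periods) and computes each supervisor's score by aggregating the 40 buckets against that pattern, never re-touching the answers.
import Mathlib
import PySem

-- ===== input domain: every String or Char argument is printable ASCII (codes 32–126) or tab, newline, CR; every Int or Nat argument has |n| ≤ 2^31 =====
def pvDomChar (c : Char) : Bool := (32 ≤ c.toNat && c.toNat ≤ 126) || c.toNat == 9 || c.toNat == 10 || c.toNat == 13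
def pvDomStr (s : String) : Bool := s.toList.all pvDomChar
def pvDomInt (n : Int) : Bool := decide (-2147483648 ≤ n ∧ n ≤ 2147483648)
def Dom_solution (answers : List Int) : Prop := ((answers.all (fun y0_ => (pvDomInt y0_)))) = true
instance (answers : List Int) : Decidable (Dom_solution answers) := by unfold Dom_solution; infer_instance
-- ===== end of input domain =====

-- B replaces A's per-element comparison against all three cyclic patterns by a
-- (index mod 40, value) histogram built in one pass, from which each pattern's
-- score is aggregated bucket-wise (objective: alternative algorithm, same cost).

-- ===== PORT A =====
-- A's single loop: three counters updated in lockstep over enumerate(answers).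
def solutionLoopA : List Int → Nat → Int × Int × Int → Int × Int × Int
  | [], _, s => s
  | a :: rest, i, (s1, s2, s3) =>
    let s1 := if ([1,2,3,4,5] : List Int).getD (i % 5) 0 = a then s1 + 1 else s1
    let s2 := if ([2,1,2,3,2,4,2,5] : List Int).getD (i % 8) 0 = a then s2 + 1 else s2
    let s3 := if ([3,3,1,1,2,2,4,4,5,5] : List Int).getD (i % 10) 0 = a then s3 + 1 else s3
    solutionLoopA rest (i + 1) (s1, s2, s3)

def solution (answers : List Int) : List Int :=
  let s := solutionLoopA answers 0 (0, 0, 0)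
  let scores : List Int := [s.1, s.2.1, s.2.2]
  let m := scores.foldl max s.1          -- max(scores), constant across the loop
  (PySem.List.enumerate scores).foldl (fun acc p => if p.2 = m then acc ++ [p.1 + 1] else acc) []

-- ===== PORT B =====
-- B: histogram counts[(i % 40, a)] built in one pass over enumerate(answers)
def buildCountsB (answers : List Int) : PySem.Dict (Int × Int) Int :=
  (PySem.List.enumerate answers).foldl
    (fun d p => d.insert (PySem.Int.mod p.1 40, p.2) (d.getD (PySem.Int.mod p.1 40, p.2) 0 + 1))
    PySem.Dict.empty

-- B: sum(counts.get((j, p[j % len(p)]), 0) for j in range(40))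
def scoreOfB (counts : PySem.Dict (Int × Int) Int) (p : List Int) : Int :=
  (PySem.List.pyRange 0 40 1).foldl
    (fun acc j => acc + counts.getD (j, PySem.List.pyGetD p (PySem.Int.mod j (p.length : Int)) 0) 0) 0

def solution_alt (answers : List Int) : List Int :=
  let counts := buildCountsB answers
  let patterns : List (List Int) := [[1,2,3,4,5], [2,1,2,3,2,4,2,5], [3,3,1,1,2,2,4,4,5,5]]
  let scores := patterns.map (scoreOfB counts)
  let m := scores.foldl max (scores.getD 0 0)   -- max(scores)
  (PySem.List.enumerate scores).foldl (fun acc q => if q.2 = m then acc ++ [q.1 + 1] else acc) []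

-- ===== PRECONDITION & SPEC =====
def Spec_solution (answers : List Int) (out : List Int) : Prop := out = solution_alt answers
instance (answers : List Int) (out : List Int) : Decidable (Spec_solution answers out) := by unfold Spec_solution; infer_instance

-- ===== CLAIM =====
def Claim_equal_solution : Prop := ∀ (answers : List Int), Dom_solution answers → Spec_solution answers (solution answers)

-- ===== LEMMAS AND PROOFS =====

-- direct count of matches of a cyclic pattern against answers, starting at index i
def cntP (p : List Int) : List Int → Nat → Int
  | [], _ => 0
  | a :: rest, i => (if p.getD (i % p.length) 0 = a then 1 else 0) + cntP p rest (i + 1)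

theorem solutionLoopA_eq (answers : List Int) :
    ∀ (i : Nat) (s1 s2 s3 : Int),
    solutionLoopA answers i (s1, s2, s3) =
      (s1 + cntP [1,2,3,4,5] answers i,
       s2 + cntP [2,1,2,3,2,4,2,5] answers i,
       s3 + cntP [3,3,1,1,2,2,4,4,5,5] answers i) := by
  induction answers with
  | nil => intro i s1 s2 s3; simp [solutionLoopA, cntP]
  | cons a rest ih =>
    intro i s1 s2 s3
    simp only [solutionLoopA, cntP, List.length, ih]
    split_ifs <;> simp only [Prod.mk.injEq] <;> exact ⟨by omega, by omega, by omega⟩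

-- the keyed list B's histogram counts: ((s+k) % 40, a_k)
def keyedL : List Int → Nat → List (Int × Int)
  | [], _ => []
  | a :: rest, i => (((i % 40 : Nat) : Int), a) :: keyedL rest (i + 1)

theorem enumerate_map_keyed (answers : List Int) :
    ∀ (s : Nat),
    (PySem.List.enumerate answers (s : Int)).map
        (fun p => (PySem.Int.mod p.1 40, p.2)) = keyedL answers s := by
  induction answers with
  | nil => intro s; simp [PySem.List.enumerate_nil, keyedL]
  | cons a rest ih =>
    intro s
    rw [PySem.List.enumerate_cons, List.map_cons, keyedL]
    refine congrArg₂ _ ?_ ?_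
    · simp
    · have := ih (s + 1); simpa using this

-- summing an indicator over List.range n picks out the single index m < n
theorem sum_range_ite (n m : Nat) (hm : m < n) (v : Int) :
    ((List.range n).map (fun k => if k = m then v else 0)).sum = v := by
  induction n with
  | zero => omega
  | succ n ih =>
    rw [List.range_succ, List.map_append, List.sum_append]
    by_cases h : m = n
    · subst h
      have h0 : ((List.range m).map (fun k => if k = m then v else 0)).sum = 0 := by
        apply List.sum_eq_zero
        intro x hx
        simp only [List.mem_map, List.mem_range] at hx
        obtain ⟨k, hk, rfl⟩ := hx
        simp [Nat.ne_of_lt hk]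
      simp [h0]
    · rw [ih (by omega)]
      have : n ≠ m := fun hh => h hh.symm
      simp [this]

-- core: the bucket-wise sum over the 40 residues equals the direct cyclic-match count
theorem sum_count_keyed (p : List Int) (hdvd : p.length ∣ 40) (answers : List Int) :
    ∀ (s : Nat),
    ((List.range 40).map
        (fun (k : Nat) => (((keyedL answers s).count (((k : Nat) : Int), p.getD (k % p.length) 0) : Nat) : Int))).sum
      = cntP p answers s := by
  induction answers with
  | nil => intro s; simp [keyedL, cntP]
  | cons a rest ih =>
    intro s
    rw [cntP]
    have hsplit : ∀ (k : Nat),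
        (((keyedL (a :: rest) s).count (((k : Nat) : Int), p.getD (k % p.length) 0) : Nat) : Int)
          = (if k = s % 40 then (if p.getD ((s % 40) % p.length) 0 = a then (1:Int) else 0) else 0)
            + (((keyedL rest (s + 1)).count (((k : Nat) : Int), p.getD (k % p.length) 0) : Nat) : Int) := by
      intro k
      rw [keyedL, List.count_cons]
      simp only [beq_iff_eq, Prod.mk.injEq]
      by_cases hk : k = s % 40
      · subst hk
        by_cases ha : p.getD ((s % 40) % p.length) 0 = a
        · rw [if_pos ⟨rfl, ha.symm⟩, if_pos rfl, if_pos ha]; omega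
        · rw [if_neg (fun h => ha h.2.symm), if_pos rfl, if_neg ha]; omega
      · rw [if_neg (fun h => hk (Nat.cast_injective h.1).symm), if_neg hk]; omega
    calc ((List.range 40).map
            (fun (k : Nat) => (((keyedL (a :: rest) s).count (((k : Nat) : Int), p.getD (k % p.length) 0) : Nat) : Int))).sum
        = ((List.range 40).map
            (fun (k : Nat) =>
              (if k = s % 40 then (if p.getD ((s % 40) % p.length) 0 = a then (1:Int) else 0) else 0)
              + (((keyedL rest (s + 1)).count (((k : Nat) : Int), p.getD (k % p.length) 0) : Nat) : Int))).sum := by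
          exact congrArg _ (List.map_congr_left (fun k _ => hsplit k))
      _ = ((List.range 40).map
            (fun (k : Nat) => if k = s % 40 then (if p.getD ((s % 40) % p.length) 0 = a then (1:Int) else 0) else 0)).sum
          + ((List.range 40).map
            (fun (k : Nat) => (((keyedL rest (s + 1)).count (((k : Nat) : Int), p.getD (k % p.length) 0) : Nat) : Int))).sum := by
          rw [PySem.List.sum_map_add_int]
      _ = (if p.getD ((s % 40) % p.length) 0 = a then (1:Int) else 0) + cntP p rest (s + 1) := by
          rw [sum_range_ite 40 (s % 40) (Nat.mod_lt _ (by omega)), ih (s + 1)]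
      _ = (if p.getD (s % p.length) 0 = a then (1:Int) else 0) + cntP p rest (s + 1) := by
          rw [Nat.mod_mod_of_dvd s hdvd]

-- B's per-pattern bucket aggregation equals the direct count
theorem scoreB_eq (p : List Int) (hdvd : p.length ∣ 40) (answers : List Int) :
    scoreOfB (buildCountsB answers) p = cntP p answers 0 := by
  have hdict : buildCountsB answers = PySem.Dict.counter (keyedL answers 0) := by
    rw [buildCountsB, ← enumerate_map_keyed answers 0,
      ← PySem.Dict.foldl_insert_getD_add_one_eq_counter, List.foldl_map]
    rfl
  have hrange : PySem.List.pyRange 0 40 1 = (List.range 40).map (fun (k : Nat) => ((k : Nat) : Int)) := by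
    rw [show (40:Int) = ((40:Nat):Int) from rfl, PySem.List.pyRange_zero_nat]
  rw [scoreOfB, hdict, PySem.List.foldl_add, zero_add, hrange, List.map_map,
    ← sum_count_keyed p hdvd answers 0]
  apply congrArg List.sum
  apply List.map_congr_left
  intro k _
  simp only [Function.comp_apply]
  rw [PySem.Dict.getD_counter, PySem.Int.mod_natCast, PySem.List.pyGetD_natCast]

theorem solution_spec' (answers : List Int) : solution answers = solution_alt answers := by
  have hA := solutionLoopA_eq answers 0 0 0 0
  simp only [solution, solution_alt, List.map_cons, List.map_nil,
    scoreB_eq [1,2,3,4,5] (by decide) answers,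
    scoreB_eq [2,1,2,3,2,4,2,5] (by decide) answers,
    scoreB_eq [3,3,1,1,2,2,4,4,5,5] (by decide) answers]
  rw [hA]
  simp only [zero_add]
  rfl

-- ===== VERDICT =====
theorem solution_spec : Claim_equal_solution := by
  intro answers _
  exact solution_spec' answers
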